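-- pv_equiv track=rewrite | github.com/AndreBisker/Projeto-2-Design-de-Software | funcoes.py | calcula_pontos_regra_simples
-- ===== SOURCE A (Python) =====
-- def calcula_pontos_regra_simples(f):
--     d={1:0,2:0,3:0,4:0,5:0,6:0}
--     for i in range(len(f)):
--         if f[i]==1:
--             d[1]+=1
--         elif f[i]==2:
--             d[2]+=2
--         elif f[i]==3:
--             d[3]+=3
--         elif f[i]==4:
--             d[4]+=4
--         elif f[i]==5:
--             d[5]+=5
--         elif f[i]==6:
--             d[6]+=6
--     return d
-- ===== SOURCE B (Python) =====
-- def calcula_pontos_regra_simples(f):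
--     return {k: k * f.count(k) for k in range(1, 7)}
-- ===== Notes on version B (the rewrite author's own statement) =====
-- stated objective: simpler
-- what changed: Removes the per-element six-way elif chain and its mutable dict entirely: B is a one-line comprehension over the fixed faces 1..6 that scans the list once per face with list.count and multiplies each face by its count.
import Mathlib
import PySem

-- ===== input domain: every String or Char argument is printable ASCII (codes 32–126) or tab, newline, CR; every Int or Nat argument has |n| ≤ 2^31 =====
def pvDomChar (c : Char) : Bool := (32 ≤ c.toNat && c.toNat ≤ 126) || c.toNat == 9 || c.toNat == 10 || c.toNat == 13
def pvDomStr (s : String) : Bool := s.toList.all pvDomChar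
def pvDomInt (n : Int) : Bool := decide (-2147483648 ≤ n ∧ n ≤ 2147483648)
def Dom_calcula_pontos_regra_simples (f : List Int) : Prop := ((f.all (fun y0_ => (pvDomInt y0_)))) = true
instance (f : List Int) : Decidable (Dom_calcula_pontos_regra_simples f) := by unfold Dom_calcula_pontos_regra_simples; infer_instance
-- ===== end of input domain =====

-- B drops A's mutable dict and per-element elif chain entirely: a comprehension over the
-- fixed faces 1..6 that scans the list once per face with list.count (objective: simpler).

-- ===== PORT A =====
def pvStepA (d : PySem.Dict Int Int) (x : Int) : PySem.Dict Int Int :=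
  if x = 1 then d.modify 1 0 (· + 1)
  else if x = 2 then d.modify 2 0 (· + 2)
  else if x = 3 then d.modify 3 0 (· + 3)
  else if x = 4 then d.modify 4 0 (· + 4)
  else if x = 5 then d.modify 5 0 (· + 5)
  else if x = 6 then d.modify 6 0 (· + 6)
  else d

def calcula_pontos_regra_simples (f : List Int) : List (Int × Int) :=
  ((PySem.List.pyRange 0 (f.length : Int) 1).foldl
      (fun d i => pvStepA d (PySem.List.pyGetD f i 0))
      (PySem.Dict.ofList [(1,0),(2,0),(3,0),(4,0),(5,0),(6,0)])).items

-- ===== PORT B =====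
def calcula_pontos_regra_simples_alt (f : List Int) : List (Int × Int) :=
  (PySem.List.pyRange 1 7 1).map (fun k => (k, k * (PySem.List.count f k : Int)))

-- ===== PRECONDITION & SPEC =====
def Spec_calcula_pontos_regra_simples (f : List Int) (out : List (Int × Int)) : Prop := out = calcula_pontos_regra_simples_alt f
instance (f : List Int) (out : List (Int × Int)) : Decidable (Spec_calcula_pontos_regra_simples f out) := by unfold Spec_calcula_pontos_regra_simples; infer_instance

-- ===== CLAIM (what is proved, stated in full; the proofs are below) =====
def Claim_equal_calcula_pontos_regra_simples : Prop := ∀ (f : List Int), Dom_calcula_pontos_regra_simples f → Spec_calcula_pontos_regra_simples f (calcula_pontos_regra_simples f)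

-- ===== LEMMAS AND PROOFS =====

-- A's loop invariant: keys stay [1..6]; at each face v, the stored value grows by v per occurrence of v.
theorem pvA_state (l : List Int) (d : PySem.Dict Int Int) (hk : d.keys = [1,2,3,4,5,6]) :
    (l.foldl pvStepA d).keys = [1,2,3,4,5,6] ∧
    ∀ v : Int, 1 ≤ v → v ≤ 6 →
      (l.foldl pvStepA d).getD v 0 = d.getD v 0 + v * (l.count v : Int) := by
  induction l generalizing d with
  | nil => exact ⟨hk, fun v _ _ => by simp⟩
  | cons x l ih =>
    have hmk : ∀ (k : Int) (f0 : Int → Int), k ∈ ([1,2,3,4,5,6] : List Int) →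
        (d.modify k 0 f0).keys = [1,2,3,4,5,6] := by
      intro k f0 hmem
      rw [PySem.Dict.keys_modify,
          PySem.Dict.keys_insert_of_contains _ _
            (by rw [PySem.Dict.contains_eq_decide_mem_keys, hk]; exact decide_eq_true hmem), hk]
    have hk' : (pvStepA d x).keys = [1,2,3,4,5,6] := by
      unfold pvStepA
      split_ifs <;> first
        | exact hk
        | exact hmk _ _ (by norm_num)
    obtain ⟨hkeys, hval⟩ := ih (pvStepA d x) hk'
    refine ⟨by simpa using hkeys, fun v h1 h6 => ?_⟩
    have hstep : (pvStepA d x).getD v 0 =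
        d.getD v 0 + (if x = v then v else 0) := by
      by_cases hxv : x = v
      · subst hxv; rw [if_pos rfl]
        unfold pvStepA
        interval_cases x <;> norm_num [PySem.Dict.getD_modify]
      · rw [if_neg hxv]
        unfold pvStepA
        split_ifs with h1' h2' h3' h4' h5' h6' <;>
          simp_all [PySem.Dict.getD_modify] <;> omega
    have hc : ((x :: l).count v : Int) = (l.count v : Int) + (if x = v then 1 else 0) := by
      by_cases hxv : x = v <;> simp [hxv]
    rw [List.foldl_cons, hval v h1 h6, hstep, hc]
    by_cases hxv : x = v <;> simp [hxv] <;> ring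

-- ===== VERDICT (by name: the statement is the Claim_ definition above) =====
theorem calcula_pontos_regra_simples_spec : Claim_equal_calcula_pontos_regra_simples := by
  intro f _
  unfold Spec_calcula_pontos_regra_simples calcula_pontos_regra_simples calcula_pontos_regra_simples_alt
  rw [PySem.List.foldl_pyRange_pyGetD' f 0 _ _ (le_refl 0)]
  simp only [Int.toNat_zero, List.drop_zero]
  have hk0 : (PySem.Dict.ofList ([(1,0),(2,0),(3,0),(4,0),(5,0),(6,0)] : List (Int × Int))).keys
      = [1,2,3,4,5,6] := by decide
  obtain ⟨hAk, hAv⟩ := pvA_state f _ hk0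
  have hnd : (f.foldl pvStepA (PySem.Dict.ofList [(1,0),(2,0),(3,0),(4,0),(5,0),(6,0)])).keys.Nodup := by
    rw [hAk]; decide
  rw [PySem.Dict.items_eq_map_keys _ hnd 0, hAk]
  have hr : PySem.List.pyRange 1 7 1 = ([1,2,3,4,5,6] : List Int) := by decide
  rw [hr]
  simp only [List.map, PySem.List.count_eq]
  rw [hAv 1 (by norm_num) (by norm_num), hAv 2 (by norm_num) (by norm_num),
      hAv 3 (by norm_num) (by norm_num), hAv 4 (by norm_num) (by norm_num),
      hAv 5 (by norm_num) (by norm_num), hAv 6 (by norm_num) (by norm_num)]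
  have e : ∀ v ∈ ([1,2,3,4,5,6] : List Int),
      (PySem.Dict.ofList ([(1,0),(2,0),(3,0),(4,0),(5,0),(6,0)] : List (Int × Int))).getD v 0 = 0 := by decide
  rw [e 1 (by norm_num), e 2 (by norm_num), e 3 (by norm_num),
      e 4 (by norm_num), e 5 (by norm_num), e 6 (by norm_num)]
  norm_num
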